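-- pv_equiv track=rewrite | github.com/febinbellamy/Codewars | 7-kyu/sum-the-repeats/sum-the-repeats.py | repeat_sum
-- ===== SOURCE A (Python) =====
-- def repeat_sum(l):
--     dict = {}
--     sum = 0;
--
--     for subArr in l:
--         temp_dict = {}
--         for num in subArr:
--             if num not in temp_dict:
--                 temp_dict[num] = 1
--         for key in temp_dict:
--             if key in dict:
--                 dict[key] += 1
--             else:
--                 dict[key] = 1
--
--     for key in dict:
--         if dict[key] > 1:
--             sum += int(key)
--
--     return sum
-- ===== SOURCE B (Python) =====
-- def repeat_sum(l):
--     # Value-major brute force over precomputed per-sub-array sets: gather the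
--     # candidate values, then for each candidate count the sub-arrays containing
--     # it (stopping at 2) by scanning the sets directly.
--     subsets = [set(sub) for sub in l]
--     candidates = set()
--     for s in subsets:
--         candidates |= s
--     total = 0
--     for v in candidates:
--         hits = 0
--         for s in subsets:
--             if v in s:
--                 hits += 1
--                 if hits == 2:
--                     break
--         if hits >= 2:
--             total += int(v)
--     return total
-- ===== Notes on version B (the rewrite author's own statement) =====
-- stated objective: alternative
-- what changed: Replaces A's sub-array-major single pass that builds a per-value count dictionary (with per-sub-array dedup dicts) and filters it by count>1 with a value-major brute force: precompute each sub-array as a set, gather the candidate values, then for each candidate count the containing sub-arrays by a direct scan (stopping at 2); no histogram is maintained.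
import Mathlib
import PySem

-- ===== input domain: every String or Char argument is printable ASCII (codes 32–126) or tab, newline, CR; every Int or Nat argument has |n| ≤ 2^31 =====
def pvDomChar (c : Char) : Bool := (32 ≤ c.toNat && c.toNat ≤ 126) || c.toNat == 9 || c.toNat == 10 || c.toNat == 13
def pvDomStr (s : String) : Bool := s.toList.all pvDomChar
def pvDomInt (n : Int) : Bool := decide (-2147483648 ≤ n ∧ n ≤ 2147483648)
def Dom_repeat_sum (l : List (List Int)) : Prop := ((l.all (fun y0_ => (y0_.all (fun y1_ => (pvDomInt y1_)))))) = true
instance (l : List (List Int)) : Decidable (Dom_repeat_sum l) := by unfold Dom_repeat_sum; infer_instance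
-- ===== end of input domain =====

-- B replaces A's sub-array-major counting pass (per-value count dictionary, per-sub-array
-- dedup dicts, final count>1 filter) by a value-major brute force: precompute each
-- sub-array as a set, collect the candidate values, then count (stopping at 2) the
-- sub-arrays containing each candidate by scanning the sets directly.

-- ===== PORT A =====
-- literal port of A: per sub-array dedup into temp_dict, merge counts into dict,
-- then sum the keys whose count exceeds 1.  int(key) on an int key is the identity.
def repeat_sum (l : List (List Int)) : Int :=
  let d : PySem.Dict Int Int :=
    l.foldl (fun (d : PySem.Dict Int Int) (subArr : List Int) =>
      let td : PySem.Dict Int Int :=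
        subArr.foldl (fun td num =>
          if td.contains num then td else td.insert num 1) PySem.Dict.empty
      td.keys.foldl (fun d key =>
        match d.get? key with
        | some v => d.insert key (v + 1)
        | none   => d.insert key 1) d) PySem.Dict.empty
  d.keys.foldl (fun s key => if d.getD key 0 > 1 then s + key else s) 0

-- ===== PORT B =====
-- literal port of Source B: subsets = [set(sub) for sub in l]; candidates |= s per set;
-- the inner loop's 'break' at hits == 2 is the saturating step 'if hits = 2 then hits'
-- (exact: the loop body only increments hits); the outer 'for v in candidates' fold is
-- order-independent (a sum of ints); int(v) on an int is the identity.
def repeat_sum_alt (l : List (List Int)) : Int :=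
  let subsets : List (PySem.Set Int) := l.map PySem.Set.ofList
  let candidates : PySem.Set Int :=
    subsets.foldl (fun (c : PySem.Set Int) s => PySem.Set.union c s) PySem.Set.empty
  candidates.foldl (fun total v =>
    let hits : Int := subsets.foldl (fun (h : Int) s =>
      if h = 2 then h else if v ∈ s then h + 1 else h) 0
    if 2 ≤ hits then total + v else total) 0

-- ===== PRECONDITION & SPEC =====
def Spec_repeat_sum (l : List (List Int)) (out : Int) : Prop := out = repeat_sum_alt l
instance (l : List (List Int)) (out : Int) : Decidable (Spec_repeat_sum l out) := by unfold Spec_repeat_sum; infer_instance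

-- ===== CLAIM (what is proved, stated in full; the proofs are below) =====
def Claim_equal_repeat_sum : Prop := ∀ (l : List (List Int)), Dom_repeat_sum l → Spec_repeat_sum l (repeat_sum l)

-- ===== LEMMAS AND PROOFS =====

-- A-side: keys of the temp_dict loop are the distinct elements of the sub-array
theorem temp_keys (sub : List Int) (td : PySem.Dict Int Int) :
    (sub.foldl (fun td num => if td.contains num then td else td.insert num 1) td).keys
      = PySem.Set.update td.keys sub := by
  induction sub generalizing td with
  | nil => rfl
  | cons x xs ih =>
    simp only [List.foldl_cons]
    have hupd : PySem.Set.update td.keys (x :: xs)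
        = PySem.Set.update (PySem.Set.add td.keys x) xs := rfl
    rw [hupd]
    by_cases hx : td.contains x
    · rw [hx]
      simp only [if_true]
      rw [ih, PySem.Set.add_of_mem ((PySem.Dict.contains_iff_mem_keys td x).mp hx)]
    · rw [Bool.not_eq_true] at hx
      rw [hx]
      simp only [Bool.false_eq_true, if_false]
      rw [ih, PySem.Dict.keys_insert_of_not_contains td 1 hx,
          PySem.Set.add_of_not_mem (fun hm => by
            rw [Bool.eq_false_iff] at hx
            exact hx ((PySem.Dict.contains_iff_mem_keys td x).mpr hm))]

-- A's increment branch is an insert of getD + 1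
theorem mid_step_eq :
    (fun (d : PySem.Dict Int Int) (key : Int) =>
      match d.get? key with
      | some v => d.insert key (v + 1)
      | none   => d.insert key 1)
    = fun d key => d.insert key (d.getD key 0 + 1) := by
  funext d key
  cases h : d.get? key with
  | some v => simp [PySem.Dict.getD_of_get?_eq_some d 0 h]
  | none => simp [PySem.Dict.getD_of_get?_eq_none d 0 h]

-- A's outer loop counts, for every value, the sub-arrays containing it
theorem a_dict_getD (l : List (List Int)) (d : PySem.Dict Int Int) (v : Int) :
    (l.foldl (fun (d : PySem.Dict Int Int) (subArr : List Int) =>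
      (subArr.foldl (fun td num =>
          if td.contains num then td else td.insert num 1)
          (PySem.Dict.empty : PySem.Dict Int Int)).keys.foldl
        (fun d key =>
          match d.get? key with
          | some v => d.insert key (v + 1)
          | none   => d.insert key 1) d) d).getD v 0
    = d.getD v 0 + (l.countP (fun sub => decide (v ∈ sub)) : Int) := by
  induction l generalizing d with
  | nil => simp
  | cons sub rest ih =>
    simp only [List.foldl_cons]
    rw [ih, List.countP_cons]
    have hks : (sub.foldl (fun td num => if td.contains num then td else td.insert num 1)
        (PySem.Dict.empty : PySem.Dict Int Int)).keys = PySem.Set.ofList sub := by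
      rw [temp_keys]; rfl
    rw [mid_step_eq, hks, PySem.Dict.getD_foldl_insert_add_one]
    have hnd : (PySem.Set.ofList sub).Nodup := PySem.Set.nodup_ofList sub
    by_cases hv : v ∈ sub
    · have hm : v ∈ PySem.Set.ofList sub := by simpa [PySem.Set.mem_ofList] using hv
      rw [List.count_eq_one_of_mem hnd hm]
      simp [hv]
      ring
    · have h0 : (PySem.Set.ofList sub).count v = 0 :=
        List.count_eq_zero.mpr (fun hm => hv (by simpa [PySem.Set.mem_ofList] using hm))
      rw [h0]
      simp [hv]

-- updating with an already-deduplicated list is updating with the original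
theorem set_update_append (s t : PySem.Set Int) (xs : List Int) :
    PySem.Set.update s (t ++ xs) = PySem.Set.update (PySem.Set.update s t) xs := by
  simp [PySem.Set.update, List.foldl_append]

theorem set_update_update (xs : List Int) (s t : PySem.Set Int) :
    PySem.Set.update s (PySem.Set.update t xs) = PySem.Set.update s (t ++ xs) := by
  induction xs generalizing t with
  | nil => simp [PySem.Set.update]
  | cons x xs ih =>
    show PySem.Set.update s (PySem.Set.update (PySem.Set.add t x) xs) = _
    rw [ih]
    by_cases hx : x ∈ t
    · rw [PySem.Set.add_of_mem hx]
      rw [set_update_append, set_update_append]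
      show _ = PySem.Set.update (PySem.Set.update (PySem.Set.update s t) [x]) xs
      have hmem : x ∈ PySem.Set.update s t := by
        rw [PySem.Set.mem_update]; exact Or.inr hx
      have h1 : PySem.Set.update (PySem.Set.update s t) [x]
          = PySem.Set.add (PySem.Set.update s t) x := rfl
      rw [h1, PySem.Set.add_of_mem hmem]
    · rw [PySem.Set.add_of_not_mem hx]
      simp

theorem set_update_ofList (s : PySem.Set Int) (xs : List Int) :
    PySem.Set.update s (PySem.Set.ofList xs) = PySem.Set.update s xs := by
  have h : PySem.Set.ofList xs = PySem.Set.update ([] : PySem.Set Int) xs := rfl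
  rw [h, set_update_update]
  rfl

-- A's dict keys evolve by Set.update with each raw sub-array — exactly B's candidate set
theorem a_dict_keys (l : List (List Int)) (d : PySem.Dict Int Int) :
    (l.foldl (fun (d : PySem.Dict Int Int) (subArr : List Int) =>
      (subArr.foldl (fun td num =>
          if td.contains num then td else td.insert num 1)
          (PySem.Dict.empty : PySem.Dict Int Int)).keys.foldl
        (fun d key =>
          match d.get? key with
          | some v => d.insert key (v + 1)
          | none   => d.insert key 1) d) d).keys
    = l.foldl (fun s sub => PySem.Set.update s sub) d.keys := by
  induction l generalizing d with
  | nil => rfl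
  | cons sub rest ih =>
    simp only [List.foldl_cons]
    rw [ih]
    congr 1
    have hks : (sub.foldl (fun td num => if td.contains num then td else td.insert num 1)
        (PySem.Dict.empty : PySem.Dict Int Int)).keys = PySem.Set.ofList sub := by
      rw [temp_keys]; rfl
    rw [mid_step_eq, PySem.Dict.keys_foldl_insert, hks, set_update_ofList]

-- B's candidate set is the fold of Set.update over the raw sub-arrays
theorem b_cands (l : List (List Int)) (c : PySem.Set Int) :
    (l.map PySem.Set.ofList).foldl (fun (c : PySem.Set Int) s => PySem.Set.union c s) c
      = l.foldl (fun s sub => PySem.Set.update s sub) c := by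
  rw [List.foldl_map]
  induction l generalizing c with
  | nil => rfl
  | cons sub rest ih =>
    simp only [List.foldl_cons]
    rw [ih]
    congr 1
    show PySem.Set.update c (PySem.Set.ofList sub) = _
    exact set_update_ofList c sub

-- B's saturating hit counter caps the number of containing sub-arrays at 2
theorem b_hits (l : List (List Int)) (v : Int) (h : Int) (hle : h ≤ 2) :
    (l.map PySem.Set.ofList).foldl (fun (h : Int) s =>
        if h = 2 then h else if v ∈ s then h + 1 else h) h
      = min 2 (h + (l.countP (fun sub => decide (v ∈ sub)) : Int)) := by
  induction l generalizing h with
  | nil => simp; omega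
  | cons sub rest ih =>
    simp only [List.map_cons, List.foldl_cons, List.countP_cons]
    by_cases h2 : h = 2
    · subst h2
      rw [if_pos (rfl : (2:Int) = 2), ih 2 le_rfl]
      have : (0:Int) ≤ (rest.countP (fun sub => decide (v ∈ sub)) : Int) := Int.natCast_nonneg _
      have : (0:Int) ≤ ((List.countP (fun sub => decide (v ∈ sub)) rest : Nat) : Int) := Int.natCast_nonneg _
      omega
    · rw [if_neg h2]
      by_cases hv : v ∈ sub
      · rw [if_pos (by simpa [PySem.Set.mem_ofList] using hv)]
        rw [ih (h + 1) (by omega)]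
        simp only [hv, decide_true]
        push_cast
        omega
      · rw [if_neg (by simpa [PySem.Set.mem_ofList] using hv)]
        rw [ih h hle]
        simp only [hv, decide_false]
        push_cast
        omega

-- ===== VERDICT (by name: the statement is the Claim_ definition above) =====
theorem repeat_sum_spec : Claim_equal_repeat_sum := by
  intro l _
  show repeat_sum l = repeat_sum_alt l
  simp only [repeat_sum, repeat_sum_alt]
  rw [a_dict_keys l PySem.Dict.empty, b_cands]
  have hK : (PySem.Dict.empty : PySem.Dict Int Int).keys = ([] : List Int) := rfl
  rw [hK]
  have hE : (PySem.Set.empty : PySem.Set Int) = ([] : List Int) := rfl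
  rw [hE]
  congr 1
  funext s key
  rw [b_hits l key 0 (by omega)]
  rw [a_dict_getD]
  have h0 : (PySem.Dict.empty : PySem.Dict Int Int).getD key 0 = 0 := rfl
  simp only [h0, zero_add]
  have hnn : (0:Int) ≤ (l.countP (fun sub => decide (key ∈ sub)) : Int) := Int.natCast_nonneg _
  exact if_congr (by omega) rfl rfl
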